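-- pv_equiv track=rewrite | github.com/Querolj/Handwritting-code | tools.py | split_file_rep
-- ===== SOURCE A (Python) =====
-- def split_file_rep(path):
-- 	file = ""
-- 	rep = ""
-- 	was_path = False
-- 	for i in range(len(path) -1,0,-1):
-- 		if path[i] == "/":
-- 			file = path[:i+1] + path[i+1:len(path)]
-- 			rep = path[:i+1]
-- 			was_path = True
-- 	return (file, rep, was_path)
-- ===== SOURCE B (Python) =====
-- def split_file_rep(path):
-- 	prefix = []
-- 	for i, c in enumerate(path):
-- 		prefix.append(c)
-- 		if c == "/" and i >= 1:
-- 			return (path, "".join(prefix), True)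
-- 	return ("", "", False)
-- ===== Notes on version B (the rewrite author's own statement) =====
-- stated objective: alternative
-- what changed: Replaces A's backward full scan with repeated slicing/overwriting by a single forward pass over enumerate(path) that accumulates the prefix character by character and early-returns at the first slash with index >= 1, never slicing the string.
import Mathlib
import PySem

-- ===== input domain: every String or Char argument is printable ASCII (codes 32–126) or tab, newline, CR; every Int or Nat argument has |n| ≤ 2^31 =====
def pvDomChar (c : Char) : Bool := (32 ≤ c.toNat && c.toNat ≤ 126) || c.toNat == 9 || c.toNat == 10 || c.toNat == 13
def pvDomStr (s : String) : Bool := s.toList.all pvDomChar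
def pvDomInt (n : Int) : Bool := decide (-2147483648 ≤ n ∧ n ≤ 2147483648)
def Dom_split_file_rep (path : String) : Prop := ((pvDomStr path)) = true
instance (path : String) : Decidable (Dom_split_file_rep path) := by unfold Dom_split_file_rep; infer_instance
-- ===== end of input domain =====

-- B replaces A's backward scan-and-overwrite (which re-slices at every slash) with one
-- forward pass over enumerate(path) that accumulates the prefix and early-returns at the
-- first slash with index >= 1; alternative decomposition, same results.


-- ===== PORT A =====
-- the loop body of A: on a slash at index i overwrite (file, rep, was_path), else keep the state
def sfrStep (path : String) (st : String × String × Bool) (i : Int) : String × String × Bool :=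
  if PySem.Str.pyGet? path i = some '/' then
    (PySem.Str.slice path none (some (i + 1)) ++
       PySem.Str.slice path (some (i + 1)) (some (PySem.Str.len path)),
     PySem.Str.slice path none (some (i + 1)), true)
  else st

def split_file_rep (path : String) : String × String × Bool :=
  (PySem.List.pyRange (PySem.Str.len path - 1) 0 (-1)).foldl (sfrStep path) ("", "", false)

-- ===== PORT B =====
-- the for-loop of B: walk the enumerated characters, growing the prefix accumulator;
-- early return at the first '/' whose index is >= 1
def sfrAltLoop (path : String) : List (Int × Char) → List Char → String × String × Bool
  | [], _ => ("", "", false)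
  | (i, c) :: rest, pfx =>
      let pfx' := pfx ++ [c]
      if c = '/' ∧ 1 ≤ i then (path, String.ofList pfx', true)
      else sfrAltLoop path rest pfx'

def split_file_rep_alt (path : String) : String × String × Bool :=
  sfrAltLoop path (PySem.List.enumerate path.toList) []

-- ===== PRECONDITION & SPEC =====
def Spec_split_file_rep (path : String) (out : String × String × Bool) : Prop := out = split_file_rep_alt path
instance (path : String) (out : String × String × Bool) : Decidable (Spec_split_file_rep path out) := by unfold Spec_split_file_rep; infer_instance

-- ===== CLAIM (what is proved, stated in full; the proofs are below) =====
def Claim_equal_split_file_rep : Prop := ∀ (path : String), Dom_split_file_rep path → Spec_split_file_rep path (split_file_rep path)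

-- ===== LEMMAS AND PROOFS =====

-- the value both programs return when the first slash at index ≥ 1 sits at index i
def sfrHit (path : String) (i : Int) : String × String × Bool :=
  (path, PySem.Str.slice path none (some (i + 1)), true)

-- common characterization: result as a function of the first '/' in path[1:]
def sfrSpecOf (path : String) (r : Option Nat) : String × String × Bool :=
  match r with
  | none => ("", "", false)
  | some j => sfrHit path ((1 + j : Nat) : Int)

theorem sfr_concat (path : String) (i : Nat) :
    PySem.Str.slice path none (some ((i : Int) + 1)) ++
      PySem.Str.slice path (some ((i : Int) + 1)) (some (PySem.Str.len path)) = path := by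
  rw [← String.toList_inj]
  have h1 : ((i : Int) + 1) = ((i + 1 : Nat) : Int) := by push_cast; ring
  simp only [String.toList_append, PySem.Str.toList_slice, PySem.Chars.slice_eq_listSlice,
    PySem.Str.len_eq, h1, PySem.List.slice_to_natCast, PySem.List.slice_natCast]
  have h2 : List.take (path.toList.length - (i + 1)) (List.drop (i + 1) path.toList)
      = List.drop (i + 1) path.toList := List.take_of_length_le (by simp)
  rw [h2]
  exact List.take_append_drop _ _

theorem sfr_fold (path : String) :
    ∀ (t pre : List Char) (st : String × String × Bool), path.toList = pre ++ t →
      List.foldl (sfrStep path) st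
          ((PySem.List.pyRange (pre.length : Int) ((path.toList.length : Nat) : Int)).reverse) =
        (match List.findIdx? (fun c => c == '/') t with
         | none => st
         | some j => sfrHit path ((pre.length + j : Nat) : Int)) := by
  intro t
  induction t with
  | nil =>
    intro pre st hsplit
    have : pre.length = path.toList.length := by simp [hsplit]
    simp [this, PySem.List.pyRange_one_eq_nil]
  | cons c t' ih =>
    intro pre st hsplit
    have hlen : (pre.length : Int) < (path.toList.length : Int) := by
      simp [hsplit]
    rw [PySem.List.pyRange_one_cons hlen]
    have hcast : (pre.length : Int) + 1 = (((pre ++ [c]).length : Nat) : Int) := by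
      simp
    rw [List.reverse_cons, List.foldl_append, hcast,
        ih (pre ++ [c]) st (by simp [hsplit])]
    have hget : PySem.Str.pyGet? path (pre.length : Int) = some c := by
      simp [hsplit]
    rw [List.findIdx?_cons]
    by_cases hc : c = '/'
    · subst hc
      have hget' : PySem.Str.pyGet? path (pre.length : Int) = some '/' := hget
      simp only [List.foldl_cons, List.foldl_nil, sfrStep, if_pos hget']
      simp only [beq_self_eq_true, if_true]
      simp only [sfrHit, sfr_concat path pre.length, Nat.add_zero]
    · have hgetne : PySem.Str.pyGet? path (pre.length : Int) ≠ some '/' := by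
        rw [hget]; simp [hc]
      simp only [List.foldl_cons, List.foldl_nil, sfrStep, if_neg hgetne]
      have hcf : (c == '/') = false := by simp [hc]
      rw [hcf]
      simp only [Bool.false_eq_true, if_false]
      cases hfi : List.findIdx? (fun c => c == '/') t' with
      | none => simp
      | some j =>
        simp only [Option.map_some]
        have harith : ((pre ++ [c]).length + j : Nat) = (pre.length + (j + 1) : Nat) := by
          simp; omega
        rw [harith]

theorem sfr_A_char (path : String) :
    split_file_rep path = sfrSpecOf path (List.findIdx? (fun c => c == '/') (path.toList.drop 1)) := by
  unfold split_file_rep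
  have hlen : PySem.Str.len path - 1 = ((path.toList.length : Nat) : Int) - 1 := by
    simp [PySem.Str.len_eq]
  rw [hlen]
  have hrev : PySem.List.pyRange (((path.toList.length : Nat) : Int) - 1) 0 (-1)
      = (PySem.List.pyRange 1 ((path.toList.length : Nat) : Int)).reverse := by
    have := PySem.List.pyRange_neg_one_eq_reverse (((path.toList.length : Nat) : Int) - 1) 0
    simpa using this
  rw [hrev]
  cases hl : path.toList with
  | nil =>
    simp [PySem.List.pyRange_one_eq_nil, sfrSpecOf]
  | cons c rest =>
    have hlen2 : ((c :: rest).length : Int) = ((path.toList.length : Nat) : Int) := by rw [hl]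
    have hr : (PySem.List.pyRange 1 ((path.toList.length : Nat) : Int)).reverse
        = (PySem.List.pyRange (([c].length : Nat) : Int) ((path.toList.length : Nat) : Int)).reverse := by
      norm_num
    rw [hlen2, hr, sfr_fold path rest [c] ("", "", false) (by simp [hl])]
    cases hfi : List.findIdx? (fun c => c == '/') rest <;> simp [sfrSpecOf, hfi]

-- B's loop, once past index 0, finds exactly the first '/' of the remaining suffix and
-- returns the accumulated prefix (= a take of path's characters)
theorem sfr_alt_fold (path : String) :
    ∀ (t pre : List Char), path.toList = pre ++ t → 1 ≤ pre.length →
      sfrAltLoop path (PySem.List.enumerate t (pre.length : Int)) pre =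
        (match List.findIdx? (fun c => c == '/') t with
         | none => ("", "", false)
         | some j => (path, String.ofList (path.toList.take (pre.length + j + 1)), true)) := by
  intro t
  induction t with
  | nil =>
    intro pre _ _
    simp [PySem.List.enumerate_nil, sfrAltLoop]
  | cons c t' ih =>
    intro pre hsplit hpre
    rw [PySem.List.enumerate_cons]
    show sfrAltLoop path (((pre.length : Int), c) :: PySem.List.enumerate t' ((pre.length : Int) + 1)) pre = _
    rw [List.findIdx?_cons]
    by_cases hc : c = '/'
    · subst hc
      have hcond : ('/' = '/' ∧ (1 : Int) ≤ (pre.length : Int)) := ⟨rfl, by exact_mod_cast hpre⟩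
      simp only [sfrAltLoop, beq_self_eq_true, if_true]
      rw [if_pos (show True ∧ (1 : Int) ≤ (pre.length : Int) from ⟨trivial, by exact_mod_cast hpre⟩)]
      have htake : path.toList.take (pre.length + 0 + 1) = pre ++ ['/'] := by
        rw [hsplit, Nat.add_zero, List.take_append]
        simp
      rw [htake]
    · have hcond : ¬ (c = '/' ∧ (1 : Int) ≤ (pre.length : Int)) := fun h => hc h.1
      simp only [sfrAltLoop, if_neg hcond]
      have hcast : (pre.length : Int) + 1 = (((pre ++ [c]).length : Nat) : Int) := by simp
      rw [hcast, ih (pre ++ [c]) (by simp [hsplit]) (by simp)]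
      have hcf : (c == '/') = false := by simp [hc]
      rw [hcf]
      simp only [Bool.false_eq_true, if_false]
      cases hfi : List.findIdx? (fun c => c == '/') t' with
      | none => simp
      | some j =>
        simp only [Option.map_some]
        have harith : (pre ++ [c]).length + j + 1 = pre.length + (j + 1) + 1 := by
          simp; omega
        rw [harith]

theorem sfr_B_char (path : String) :
    split_file_rep_alt path = sfrSpecOf path (List.findIdx? (fun c => c == '/') (path.toList.drop 1)) := by
  unfold split_file_rep_alt
  cases hl : path.toList with
  | nil =>
    simp [PySem.List.enumerate_nil, sfrAltLoop, sfrSpecOf]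
  | cons c rest =>
    rw [PySem.List.enumerate_cons]
    have hcond : ¬ (c = '/' ∧ (1 : Int) ≤ (0 : Int)) := fun h => by omega
    simp only [sfrAltLoop, if_neg hcond, List.nil_append]
    have hcast : (0 : Int) + 1 = ((([c] : List Char).length : Nat) : Int) := by simp
    rw [hcast, sfr_alt_fold path rest [c] (by simp [hl]) (by simp)]
    rw [show List.drop 1 (c :: rest) = rest from rfl]
    cases hfi : List.findIdx? (fun c => c == '/') rest with
    | none => simp [sfrSpecOf]
    | some j =>
      simp only [sfrSpecOf, sfrHit]
      have hslice : PySem.Str.slice path none (some (((1 + j : Nat) : Int) + 1))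
          = String.ofList (path.toList.take ([c].length + j + 1)) := by
        rw [← String.toList_inj]
        have h1 : (((1 + j : Nat) : Int) + 1) = ((1 + j + 1 : Nat) : Int) := by push_cast; ring
        simp only [PySem.Str.toList_slice, PySem.Chars.slice_eq_listSlice, h1,
          PySem.List.slice_to_natCast, String.toList_ofList, List.length_cons, List.length_nil]
      rw [hslice]

-- ===== VERDICT (by name: the statement is the Claim_ definition above) =====
theorem split_file_rep_spec : Claim_equal_split_file_rep := by
  intro path _
  unfold Spec_split_file_rep
  rw [sfr_A_char, sfr_B_char]
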